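-- pv_equiv track=rewrite | github.com/LukeGibson/SquashVision | Project/src/Project/v8_calculations.py | expandTrackGaps
-- ===== SOURCE A (Python) =====
-- def expandTrackGaps(trackPoints, linePoints):
--     cleanTrackPoints = []
--     cleanTrackPoints.append(trackPoints[0])
--     cleanTrackPoints.append(trackPoints[1])
--
--     cleanLinePoints = []
--     cleanLinePoints.append(linePoints[0])
--     cleanLinePoints.append(linePoints[1])
--
--     # if either neighbouring point doesn't have a ball detection assume the detection in current point is poor
--     for i in range(2, len(trackPoints) - 2):
--         if trackPoints[i-1] != (-1,-1,0) and trackPoints[i+1] != (-1,-1,0) and trackPoints[i+2] != (-1,-1,0) and trackPoints[i-2] != (-1,-1,0):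
--             cleanTrackPoints.append(trackPoints[i])
--             cleanLinePoints.append(linePoints[i])
--         else:
--             cleanTrackPoints.append((-1,-1,0))
--             cleanLinePoints.append(cleanLinePoints[i-1])
--
--     cleanTrackPoints.append(trackPoints[-2])
--     cleanTrackPoints.append(trackPoints[-1])
--
--     cleanLinePoints.append(linePoints[-2])
--     cleanLinePoints.append(linePoints[-1])
--
--     return cleanTrackPoints, cleanLinePoints
-- ===== SOURCE B (Python) =====
-- def _mark(mask, k, n):
--     # set mask[k] when k is a middle index (2 .. n-3)
--     if 2 <= k <= n - 3:
--         mask[k] = True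
--
--
-- def expandTrackGaps(trackPoints, linePoints):
--     n = len(trackPoints)
--
--     # scatter pass: dilate every missing detection onto its 2-neighbourhood
--     # (the missing index itself is NOT marked)
--     mask = [False] * n
--     for j, p in enumerate(trackPoints):
--         if p == (-1, -1, 0):
--             _mark(mask, j - 2, n)
--             _mark(mask, j - 1, n)
--             _mark(mask, j + 1, n)
--             _mark(mask, j + 2, n)
--
--     cleanTrackPoints = trackPoints[:2]
--     cleanLinePoints = linePoints[:2]
--     lastCleanLine = linePoints[1]
--
--     for i in range(2, n - 2):
--         if mask[i]:
--             cleanTrackPoints.append((-1, -1, 0))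
--             cleanLinePoints.append(lastCleanLine)
--         else:
--             cleanTrackPoints.append(trackPoints[i])
--             cleanLinePoints.append(linePoints[i])
--             lastCleanLine = linePoints[i]
--
--     cleanTrackPoints += trackPoints[-2:]
--     cleanLinePoints += linePoints[-2:]
--     return cleanTrackPoints, cleanLinePoints
-- ===== Notes on version B (the rewrite author's own statement) =====
-- stated objective: alternative
-- what changed: B computes the gap set by a scatter pass (dilating each missing detection onto its 2-neighbourhood into a boolean mask, never marking the missing index itself) and then does one sequential emit pass carrying a lastCleanLine accumulator, instead of A's per-index four-way neighbour gather and re-indexing of the output list being built.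
import Mathlib
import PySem

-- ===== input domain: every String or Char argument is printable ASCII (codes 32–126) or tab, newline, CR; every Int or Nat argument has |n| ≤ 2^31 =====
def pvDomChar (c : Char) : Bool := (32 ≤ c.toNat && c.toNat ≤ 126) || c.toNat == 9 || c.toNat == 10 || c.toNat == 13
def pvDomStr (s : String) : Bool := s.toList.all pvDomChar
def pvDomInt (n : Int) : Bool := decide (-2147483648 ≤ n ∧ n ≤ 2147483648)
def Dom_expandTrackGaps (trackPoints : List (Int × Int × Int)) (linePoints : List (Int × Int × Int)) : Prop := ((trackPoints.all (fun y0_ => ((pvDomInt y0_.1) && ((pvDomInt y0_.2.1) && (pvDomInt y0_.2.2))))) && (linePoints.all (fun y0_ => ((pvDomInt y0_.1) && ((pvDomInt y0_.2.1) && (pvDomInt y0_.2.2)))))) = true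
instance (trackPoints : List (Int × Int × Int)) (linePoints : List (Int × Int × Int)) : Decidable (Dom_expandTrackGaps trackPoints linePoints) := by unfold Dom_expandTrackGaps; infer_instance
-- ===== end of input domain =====

-- B replaces A's per-index four-way neighbour gather by a scatter pass (a boolean
-- gap mask dilated from each missing detection) followed by one emit pass that
-- carries the last clean line point in an accumulator; same O(n) cost, different
-- decomposition ("alternative").

def pvMiss : Int × Int × Int := (-1, -1, 0)

-- ===== PORT A =====
-- (pyGetD default (0,0,0) is never consulted: Pre_ keeps every index in range)
def expandTrackGaps (trackPoints : List (Int × Int × Int)) (linePoints : List (Int × Int × Int)) : (List (Int × Int × Int)) × (List (Int × Int × Int)) :=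
  let d : Int × Int × Int := (0, 0, 0)
  let s := (PySem.List.pyRange 2 (PySem.List.len trackPoints - 2) 1).foldl
    (fun (s : List (Int × Int × Int) × List (Int × Int × Int)) i =>
      if PySem.List.pyGetD trackPoints (i-1) d ≠ pvMiss ∧ PySem.List.pyGetD trackPoints (i+1) d ≠ pvMiss ∧ PySem.List.pyGetD trackPoints (i+2) d ≠ pvMiss ∧ PySem.List.pyGetD trackPoints (i-2) d ≠ pvMiss
      then (s.1 ++ [PySem.List.pyGetD trackPoints i d], s.2 ++ [PySem.List.pyGetD linePoints i d])
      else (s.1 ++ [pvMiss], s.2 ++ [PySem.List.pyGetD s.2 (i-1) d]))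
    ([PySem.List.pyGetD trackPoints 0 d, PySem.List.pyGetD trackPoints 1 d],
     [PySem.List.pyGetD linePoints 0 d, PySem.List.pyGetD linePoints 1 d])
  (s.1 ++ [PySem.List.pyGetD trackPoints (-2) d, PySem.List.pyGetD trackPoints (-1) d],
   s.2 ++ [PySem.List.pyGetD linePoints (-2) d, PySem.List.pyGetD linePoints (-1) d])

-- ===== PORT B =====
-- _mark(mask, k, n) of Source B
def pvMark (n : Int) (m : List Bool) (k : Int) : List Bool :=
  if 2 ≤ k ∧ k ≤ n - 3 then PySem.List.pySetD m k true else m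

-- body of Source B's scatter loop for one enumerated point
def pvScatter (n : Int) (m : List Bool) (jp : Int × (Int × Int × Int)) : List Bool :=
  if jp.2 = pvMiss then
    pvMark n (pvMark n (pvMark n (pvMark n m (jp.1 - 2)) (jp.1 - 1)) (jp.1 + 1)) (jp.1 + 2)
  else m

def pvBuildMask (trackPoints : List (Int × Int × Int)) : List Bool :=
  (PySem.List.enumerate trackPoints 0).foldl (pvScatter (PySem.List.len trackPoints))
    (List.replicate trackPoints.length false)

def expandTrackGaps_alt (trackPoints : List (Int × Int × Int)) (linePoints : List (Int × Int × Int)) : (List (Int × Int × Int)) × (List (Int × Int × Int)) :=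
  let d : Int × Int × Int := (0, 0, 0)
  let n := PySem.List.len trackPoints
  let mask := pvBuildMask trackPoints
  let s := (PySem.List.pyRange 2 (n - 2) 1).foldl
    (fun (s : List (Int × Int × Int) × List (Int × Int × Int) × (Int × Int × Int)) i =>
      if PySem.List.pyGetD mask i false = true
      then (s.1 ++ [pvMiss], s.2.1 ++ [s.2.2], s.2.2)
      else (s.1 ++ [PySem.List.pyGetD trackPoints i d], s.2.1 ++ [PySem.List.pyGetD linePoints i d], PySem.List.pyGetD linePoints i d))
    (PySem.List.slice trackPoints none (some 2), PySem.List.slice linePoints none (some 2), PySem.List.pyGetD linePoints 1 d)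
  (s.1 ++ PySem.List.slice trackPoints (some (-2)) none,
   s.2.1 ++ PySem.List.slice linePoints (some (-2)) none)

-- ===== PRECONDITION & SPEC =====
-- Pre_ = exactly the inputs where Python A raises no IndexError: both lists have at
-- least 2 points and linePoints reaches every middle index 2 .. len(trackPoints)-3.
def Pre_expandTrackGaps (trackPoints : List (Int × Int × Int)) (linePoints : List (Int × Int × Int)) : Prop :=
  2 ≤ trackPoints.length ∧ 2 ≤ linePoints.length ∧ trackPoints.length ≤ linePoints.length + 2
instance (trackPoints : List (Int × Int × Int)) (linePoints : List (Int × Int × Int)) : Decidable (Pre_expandTrackGaps trackPoints linePoints) := by unfold Pre_expandTrackGaps; infer_instance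

def pvWitness_expandTrackGaps : (List (Int × Int × Int)) × (List (Int × Int × Int)) :=
  ([(5, 5, 1), (6, 6, 1), (-1, -1, 0), (7, 7, 1), (8, 8, 1), (9, 9, 1)],
   [(1, 1, 1), (2, 2, 1), (3, 3, 1), (4, 4, 1), (5, 5, 1), (6, 6, 1)])

def Spec_expandTrackGaps (trackPoints : List (Int × Int × Int)) (linePoints : List (Int × Int × Int)) (out : (List (Int × Int × Int)) × (List (Int × Int × Int))) : Prop := out = expandTrackGaps_alt trackPoints linePoints
instance (trackPoints : List (Int × Int × Int)) (linePoints : List (Int × Int × Int)) (out : (List (Int × Int × Int)) × (List (Int × Int × Int))) : Decidable (Spec_expandTrackGaps trackPoints linePoints out) := by unfold Spec_expandTrackGaps; infer_instance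

-- ===== CLAIM (what is proved, stated in full; the proofs are below) =====
def Claim_equal_expandTrackGaps : Prop := ∀ (trackPoints : List (Int × Int × Int)) (linePoints : List (Int × Int × Int)), Dom_expandTrackGaps trackPoints linePoints → Pre_expandTrackGaps trackPoints linePoints → Spec_expandTrackGaps trackPoints linePoints (expandTrackGaps trackPoints linePoints)

-- ===== LEMMAS AND PROOFS =====

theorem pvMark_length (n : Int) (m : List Bool) (k : Int) : (pvMark n m k).length = m.length := by
  unfold pvMark; split
  · simp [PySem.List.length_pySetD]
  · rfl

theorem pvScatter_length (n : Int) (m : List Bool) (jp : Int × (Int × Int × Int)) :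
    (pvScatter n m jp).length = m.length := by
  unfold pvScatter; split
  · simp [pvMark_length]
  · rfl

theorem pvMark_get_iff (n : Int) (m : List Bool) (k i : Int)
    (hlen : (m.length : Int) = n) (h0 : 0 ≤ i) (hi : i < n) :
    PySem.List.pyGetD (pvMark n m k) i false = true ↔
      PySem.List.pyGetD m i false = true ∨ (i = k ∧ 2 ≤ i ∧ i ≤ n - 3) := by
  unfold pvMark
  split
  · rename_i hk
    rw [PySem.List.pySetD_of_nonneg m true (by omega : (0:Int) ≤ k)]
    rw [PySem.List.pyGetD_eq_getElem _ _ h0 (by simp; omega)]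
    rw [PySem.List.pyGetD_eq_getElem _ _ h0 (by omega)]
    rw [List.getElem_set]
    by_cases hik : i = k
    · subst hik; simp [hk.1, hk.2]
    · have hne : k.toNat ≠ i.toNat := by omega
      simp [hne, hik]
  · rename_i hk
    constructor
    · intro h; left; exact h
    · rintro (h | ⟨rfl, h2, h3⟩)
      · exact h
      · exact absurd ⟨h2, h3⟩ hk

theorem pvScatter_get_iff (n : Int) (m : List Bool) (jp : Int × (Int × Int × Int)) (i : Int)
    (hlen : (m.length : Int) = n) (h0 : 0 ≤ i) (hi : i < n) :
    PySem.List.pyGetD (pvScatter n m jp) i false = true ↔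
      PySem.List.pyGetD m i false = true ∨
        (jp.2 = pvMiss ∧ (i = jp.1 - 2 ∨ i = jp.1 - 1 ∨ i = jp.1 + 1 ∨ i = jp.1 + 2) ∧ 2 ≤ i ∧ i ≤ n - 3) := by
  unfold pvScatter
  split
  · rename_i hm
    rw [pvMark_get_iff n _ _ i (by simp [pvMark_length]; omega) h0 hi]
    rw [pvMark_get_iff n _ _ i (by simp [pvMark_length]; omega) h0 hi]
    rw [pvMark_get_iff n _ _ i (by simp [pvMark_length]; omega) h0 hi]
    rw [pvMark_get_iff n _ _ i hlen h0 hi]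
    constructor
    · rintro ((((h | h) | h) | h) | h)
      · exact Or.inl h
      · exact Or.inr ⟨hm, by omega, h.2⟩
      · exact Or.inr ⟨hm, by omega, h.2⟩
      · exact Or.inr ⟨hm, by omega, h.2⟩
      · exact Or.inr ⟨hm, by omega, h.2⟩
    · rintro (h | ⟨_, (h | h | h | h), h2⟩)
      · exact Or.inl (Or.inl (Or.inl (Or.inl h)))
      · exact Or.inl (Or.inl (Or.inl (Or.inr ⟨h, h2⟩)))
      · exact Or.inl (Or.inl (Or.inr ⟨h, h2⟩))
      · exact Or.inl (Or.inr ⟨h, h2⟩)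
      · exact Or.inr ⟨h, h2⟩
  · rename_i hm
    constructor
    · exact Or.inl
    · rintro (h | ⟨hmm, _⟩)
      · exact h
      · exact absurd hmm hm

theorem pvMaskAux_get (n : Int) (xs : List (Int × Int × Int)) :
    ∀ (s : Int) (m : List Bool), (m.length : Int) = n → ∀ (i : Int), 0 ≤ i → i < n →
    (PySem.List.pyGetD ((PySem.List.enumerate xs s).foldl (pvScatter n) m) i false = true ↔
      PySem.List.pyGetD m i false = true ∨
        (2 ≤ i ∧ i ≤ n - 3 ∧ ∃ k : Nat, ∃ hk : k < xs.length, xs[k] = pvMiss ∧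
          (i = s + k - 2 ∨ i = s + k - 1 ∨ i = s + k + 1 ∨ i = s + k + 2))) := by
  induction xs with
  | nil => intro s m hlen i h0 hi; simp [PySem.List.enumerate_nil]
  | cons x xs ih =>
    intro s m hlen i h0 hi
    rw [PySem.List.enumerate_cons, List.foldl_cons]
    rw [ih (s+1) _ (by rw [pvScatter_length]; exact hlen) i h0 hi]
    rw [pvScatter_get_iff n m (s, x) i hlen h0 hi]
    constructor
    · rintro ((h | ⟨hx, hd, h2, h3⟩) | ⟨h2, h3, k, hk, hmiss, hd⟩)
      · exact Or.inl h
      · exact Or.inr ⟨h2, h3, 0, by simp, by simpa using hx, by simp; omega⟩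
      · exact Or.inr ⟨h2, h3, k+1, by simpa using hk, by simpa using hmiss, by push_cast at hd ⊢; omega⟩
    · rintro (h | ⟨h2, h3, k, hk, hmiss, hd⟩)
      · exact Or.inl (Or.inl h)
      · match k with
        | 0 => exact Or.inl (Or.inr ⟨by simpa using hmiss, by simp at hd; omega, h2, h3⟩)
        | k+1 => exact Or.inr ⟨h2, h3, k, by simpa using hk, by simpa using hmiss, by push_cast at hd ⊢; omega⟩

theorem pvMask_get (tp : List (Int × Int × Int)) (i : Int)
    (h2 : 2 ≤ i) (h3 : i ≤ (tp.length : Int) - 3) :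
    (PySem.List.pyGetD (pvBuildMask tp) i false = true ↔
      ∃ k : Nat, ∃ hk : k < tp.length, tp[k] = pvMiss ∧
        (i = (k : Int) - 2 ∨ i = (k : Int) - 1 ∨ i = (k : Int) + 1 ∨ i = (k : Int) + 2)) := by
  unfold pvBuildMask
  have hlen : ((List.replicate tp.length (false : Bool)).length : Int) = PySem.List.len tp := by
    simp
  rw [pvMaskAux_get (PySem.List.len tp) tp 0 _ hlen i (by omega) (by simp [PySem.List.len_eq]; omega)]
  have hrep : PySem.List.pyGetD (List.replicate tp.length false) i false = false := by
    rw [PySem.List.pyGetD_eq_getElem _ _ (by omega) (by simp [PySem.List.len_eq] at hlen ⊢; omega)]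
    simp
  rw [hrep]
  simp only [PySem.List.len_eq] at h3 ⊢
  constructor
  · rintro (h | ⟨_, _, k, hk, hmiss, hd⟩)
    · simp at h
    · exact ⟨k, hk, hmiss, by omega⟩
  · rintro ⟨k, hk, hmiss, hd⟩
    exact Or.inr ⟨h2, h3, k, hk, hmiss, by omega⟩

theorem pvMask_cond (tp : List (Int × Int × Int)) (i : Int)
    (h2 : 2 ≤ i) (h3 : i ≤ (tp.length : Int) - 3) :
    (PySem.List.pyGetD (pvBuildMask tp) i false = true ↔
      ¬ (PySem.List.pyGetD tp (i-1) (0,0,0) ≠ pvMiss ∧ PySem.List.pyGetD tp (i+1) (0,0,0) ≠ pvMiss ∧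
         PySem.List.pyGetD tp (i+2) (0,0,0) ≠ pvMiss ∧ PySem.List.pyGetD tp (i-2) (0,0,0) ≠ pvMiss)) := by
  rw [pvMask_get tp i h2 h3]
  rw [PySem.List.pyGetD_eq_getElem tp _ (by omega) (by omega)]
  rw [PySem.List.pyGetD_eq_getElem tp _ (by omega) (by omega)]
  rw [PySem.List.pyGetD_eq_getElem tp _ (by omega) (by omega)]
  rw [PySem.List.pyGetD_eq_getElem tp _ (by omega) (by omega)]
  constructor
  · rintro ⟨k, hk, hmiss, (hd | hd | hd | hd)⟩ ⟨ha, hb, hc, hd'⟩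
    · exact hc (by have hkk : (i+2).toNat = k := by omega
                   simp only [hkk]; exact hmiss)
    · exact hb (by have hkk : (i+1).toNat = k := by omega
                   simp only [hkk]; exact hmiss)
    · exact ha (by have hkk : (i-1).toNat = k := by omega
                   simp only [hkk]; exact hmiss)
    · exact hd' (by have hkk : (i-2).toNat = k := by omega
                    simp only [hkk]; exact hmiss)
  · intro h
    by_cases ha : tp[(i-1).toNat] = pvMiss
    · exact ⟨(i-1).toNat, by omega, ha, by omega⟩
    by_cases hb : tp[(i+1).toNat] = pvMiss
    · exact ⟨(i+1).toNat, by omega, hb, by omega⟩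
    by_cases hc : tp[(i+2).toNat] = pvMiss
    · exact ⟨(i+2).toNat, by omega, hc, by omega⟩
    by_cases hd : tp[(i-2).toNat] = pvMiss
    · exact ⟨(i-2).toNat, by omega, hd, by omega⟩
    exact absurd ⟨ha, hb, hc, hd⟩ h

theorem pvLoop_eq (tp lp : List (Int × Int × Int)) :
    ∀ (t : Nat) (a : Int) (ct cl : List (Int × Int × Int)) (last : Int × Int × Int),
    2 ≤ a → a + (t : Int) = (tp.length : Int) - 2 →
    cl.getLast? = some last → (cl.length : Int) = a →
    (PySem.List.pyRange a ((tp.length : Int) - 2) 1).foldl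
      (fun (s : List (Int × Int × Int) × List (Int × Int × Int)) i =>
        if PySem.List.pyGetD tp (i-1) (0,0,0) ≠ pvMiss ∧ PySem.List.pyGetD tp (i+1) (0,0,0) ≠ pvMiss ∧ PySem.List.pyGetD tp (i+2) (0,0,0) ≠ pvMiss ∧ PySem.List.pyGetD tp (i-2) (0,0,0) ≠ pvMiss
        then (s.1 ++ [PySem.List.pyGetD tp i (0,0,0)], s.2 ++ [PySem.List.pyGetD lp i (0,0,0)])
        else (s.1 ++ [pvMiss], s.2 ++ [PySem.List.pyGetD s.2 (i-1) (0,0,0)])) (ct, cl)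
    = (fun (r : List (Int × Int × Int) × List (Int × Int × Int) × (Int × Int × Int)) => (r.1, r.2.1))
      ((PySem.List.pyRange a ((tp.length : Int) - 2) 1).foldl
        (fun (s : List (Int × Int × Int) × List (Int × Int × Int) × (Int × Int × Int)) i =>
          if PySem.List.pyGetD (pvBuildMask tp) i false = true
          then (s.1 ++ [pvMiss], s.2.1 ++ [s.2.2], s.2.2)
          else (s.1 ++ [PySem.List.pyGetD tp i (0,0,0)], s.2.1 ++ [PySem.List.pyGetD lp i (0,0,0)], PySem.List.pyGetD lp i (0,0,0)))
        (ct, cl, last)) := by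
  intro t
  induction t with
  | zero =>
    intro a ct cl last h2 ht hlast hlen
    rw [PySem.List.pyRange_one_eq_nil (by omega)]
    simp
  | succ t ih =>
    intro a ct cl last h2 ht hlast hlen
    rw [PySem.List.pyRange_one_cons (by omega)]
    rw [List.foldl_cons, List.foldl_cons]
    by_cases hC : PySem.List.pyGetD tp (a-1) (0,0,0) ≠ pvMiss ∧ PySem.List.pyGetD tp (a+1) (0,0,0) ≠ pvMiss ∧ PySem.List.pyGetD tp (a+2) (0,0,0) ≠ pvMiss ∧ PySem.List.pyGetD tp (a-2) (0,0,0) ≠ pvMiss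
    · have hmask : ¬ (PySem.List.pyGetD (pvBuildMask tp) a false = true) := by
        rw [pvMask_cond tp a h2 (by omega)]
        intro hcon; exact hcon hC
      simp only [if_pos hC, if_neg hmask]
      exact ih (a+1) _ _ _ (by omega) (by omega) (by simp) (by simp; omega)
    · have hmask : PySem.List.pyGetD (pvBuildMask tp) a false = true := by
        rw [pvMask_cond tp a h2 (by omega)]
        exact hC
      have hfill : PySem.List.pyGetD cl (a-1) (0,0,0) = last := by
        rw [PySem.List.pyGetD_eq_getElem cl _ (by omega) (by omega)]
        rw [List.getLast?_eq_getElem?] at hlast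
        rcases List.getElem?_eq_some_iff.mp hlast with ⟨hh, hv⟩
        rw [← hv]
        congr 1
        omega
      simp only [if_neg hC, if_pos hmask, hfill]
      exact ih (a+1) _ _ _ (by omega) (by omega) (by simp) (by simp; omega)

theorem pvDrop_last_two {α : Type} (l : List α) (h : 2 ≤ l.length) :
    l.drop (l.length - 2) = [l[l.length-2], l[l.length-1]] := by
  apply List.ext_getElem
  · simp; omega
  · intro i h1 h2
    simp only [List.getElem_drop]
    match i with
    | 0 => simp
    | 1 =>
      simp only [List.getElem_cons_succ, List.getElem_cons_zero]
      congr 1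
      omega

-- ===== VERDICT (by name: the statement is the Claim_ definition above) =====
theorem expandTrackGaps_spec : Claim_equal_expandTrackGaps := by
  intro tp lp _ hPre
  unfold Spec_expandTrackGaps
  obtain ⟨hT, hL, hTL⟩ := hPre
  rcases tp with _ | ⟨t0, tp'⟩
  · simp at hT
  rcases tp' with _ | ⟨t1, tr⟩
  · simp at hT
  rcases lp with _ | ⟨l0, lp'⟩
  · simp at hL
  rcases lp' with _ | ⟨l1, lr⟩
  · simp at hL
  set tp := t0 :: t1 :: tr with htp
  set lp := l0 :: l1 :: lr with hlp
  have e0 : PySem.List.pyGetD tp 0 (0,0,0) = t0 := by rw [htp, PySem.List.pyGetD_zero_cons]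
  have e1 : PySem.List.pyGetD tp 1 (0,0,0) = t1 := by rw [htp, PySem.List.pyGetD_ofNat']; rfl
  have f0 : PySem.List.pyGetD lp 0 (0,0,0) = l0 := by rw [hlp, PySem.List.pyGetD_zero_cons]
  have f1 : PySem.List.pyGetD lp 1 (0,0,0) = l1 := by rw [hlp, PySem.List.pyGetD_ofNat']; rfl
  have hsT : PySem.List.slice tp none (some 2) = [t0, t1] := by
    rw [PySem.List.slice_to tp (by omega : (0:Int) ≤ 2)]
    rw [htp]; rfl
  have hsL : PySem.List.slice lp none (some 2) = [l0, l1] := by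
    rw [PySem.List.slice_to lp (by omega : (0:Int) ≤ 2)]
    rw [hlp]; rfl
  have tT2 : PySem.List.pyGetD tp (-2) (0,0,0) = tp[tp.length-2]'(by omega) := by
    rw [PySem.List.pyGetD_neg_ofNat tp 2 (0,0,0) (by omega) (by omega)]
  have tT1 : PySem.List.pyGetD tp (-1) (0,0,0) = tp[tp.length-1]'(by omega) := by
    rw [PySem.List.pyGetD_neg_ofNat tp 1 (0,0,0) (by omega) (by omega)]
  have tL2 : PySem.List.pyGetD lp (-2) (0,0,0) = lp[lp.length-2]'(by omega) := by
    rw [PySem.List.pyGetD_neg_ofNat lp 2 (0,0,0) (by omega) (by omega)]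
  have tL1 : PySem.List.pyGetD lp (-1) (0,0,0) = lp[lp.length-1]'(by omega) := by
    rw [PySem.List.pyGetD_neg_ofNat lp 1 (0,0,0) (by omega) (by omega)]
  have hslT : PySem.List.slice tp (some (-2)) none = [tp[tp.length-2]'(by omega), tp[tp.length-1]'(by omega)] := by
    rw [PySem.List.slice_from_neg_ofNat tp 2 (by omega)]
    exact pvDrop_last_two tp hT
  have hslL : PySem.List.slice lp (some (-2)) none = [lp[lp.length-2]'(by omega), lp[lp.length-1]'(by omega)] := by
    rw [PySem.List.slice_from_neg_ofNat lp 2 (by omega)]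
    exact pvDrop_last_two lp hL
  show expandTrackGaps tp lp = expandTrackGaps_alt tp lp
  unfold expandTrackGaps expandTrackGaps_alt
  simp only [PySem.List.len_eq, e0, e1, f0, f1, hsT, hsL, tT2, tT1, tL2, tL1, hslT, hslL]
  by_cases hn : 4 ≤ tp.length
  · have hloop := pvLoop_eq tp lp (tp.length - 4) 2 [t0, t1] [l0, l1] l1
      (by omega) (by omega) (by simp) (by simp)
    rw [hloop]
  · rw [PySem.List.pyRange_one_eq_nil (by omega : ((tp.length : Int) - 2) ≤ 2)]
    simp
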